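-- pv_equiv track=rewrite | github.com/BorisiukIvan/math | NT_Sequences/ExSeq1Fast.py | add
-- ===== SOURCE A (Python) =====
-- def add(x):
--     x = x + 1
--     if (x % 18): return x
--     n = 1
--     s = 18
--     x2 = x
--     while (x2 % (s*18) == 0):
--        n = n + s
--        s = s * 18
--     n = n * ( (x2//s) % 18)
--     return x + n
-- ===== SOURCE B (Python) =====
-- def add(x):
--     x = x + 1
--     if x % 18:
--         return x
--     r = add(x // 18 - 1)
--     return 18 * r + r % 18
-- ===== Notes on version B (the rewrite author's own statement) =====
-- stated objective: simpler
-- what changed: Replaces A's iterative loop that accumulates the geometric sum (n, s) and then multiplies by the extracted digit with a direct self-recursion: add recurses on x//18 and rebuilds the result as 18*r + r%18, never computing a valuation, power, or geometric sum.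
-- outside the precondition, e.g. on add(-1): A does not finish within the time limit, B raises RecursionError
import Mathlib
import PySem

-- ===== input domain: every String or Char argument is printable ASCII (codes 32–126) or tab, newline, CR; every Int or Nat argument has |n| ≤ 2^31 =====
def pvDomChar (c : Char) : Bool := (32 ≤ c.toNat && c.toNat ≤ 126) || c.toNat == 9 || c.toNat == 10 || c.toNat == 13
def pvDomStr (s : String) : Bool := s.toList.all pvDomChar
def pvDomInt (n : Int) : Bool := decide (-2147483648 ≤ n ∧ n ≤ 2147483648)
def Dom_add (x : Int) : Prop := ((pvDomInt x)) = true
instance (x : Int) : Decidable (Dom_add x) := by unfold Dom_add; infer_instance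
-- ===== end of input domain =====

-- B replaces A's accumulation loop (pair (n, s), valuation, digit extraction) with a
-- direct self-recursion on x // 18 that rebuilds the result as 18*r + r%18 (objective: simpler).

-- ===== PORT A =====
-- while (x2 % (s*18) == 0): n = n + s; s = s * 18   (fuel-based; fuel x2.natAbs+1 always suffices for x2 ≠ 0)
def addLoopA (fuel : Nat) (x2 n s : Int) : Int × Int :=
  match fuel with
  | 0 => (n, s)
  | f+1 =>
    if PySem.Int.mod x2 (s * 18) = 0 then addLoopA f x2 (n + s) (s * 18)
    else (n, s)

def add (x : Int) : Int :=
  let x1 := x + 1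
  if PySem.Int.mod x1 18 ≠ 0 then x1
  else
    let ns := addLoopA (x1.natAbs + 1) x1 1 18
    x1 + ns.1 * (PySem.Int.mod (PySem.Int.floordiv x1 ns.2) 18)

-- ===== PORT B =====
-- the self-recursion of Source B, fuel-based ((x+1).natAbs + 1 always suffices for x ≠ -1)
def addAltB (fuel : Nat) (x : Int) : Int :=
  match fuel with
  | 0 => x + 1
  | f+1 =>
    let y := x + 1
    if PySem.Int.mod y 18 ≠ 0 then y
    else
      let r := addAltB f (PySem.Int.floordiv y 18 - 1)
      18 * r + PySem.Int.mod r 18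

def add_alt (x : Int) : Int := addAltB ((x + 1).natAbs + 1) x

-- ===== PRECONDITION & SPEC =====
-- Pre_ excludes only x = -1: there x+1 = 0 and A's while loop never terminates (B recurses forever there too).
def Pre_add (x : Int) : Prop := x ≠ -1
instance (x : Int) : Decidable (Pre_add x) := by unfold Pre_add; infer_instance
def pvWitness_add : Int := 0

def Spec_add (x : Int) (out : Int) : Prop := out = add_alt x
instance (x : Int) (out : Int) : Decidable (Spec_add x out) := by unfold Spec_add; infer_instance

-- ===== CLAIM (what is proved, stated in full; the proofs are below) =====
def Claim_equal_add : Prop := ∀ (x : Int), Dom_add x → Pre_add x → Spec_add x (add x)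

-- ===== LEMMAS AND PROOFS =====

-- the 18-adic valuation, the mathematical object both programs compute with
def nu (t : Int) : Nat :=
  if h : t ≠ 0 ∧ (18:Int) ∣ t then nu (t / 18) + 1 else 0
termination_by t.natAbs
decreasing_by
  obtain ⟨ht, k, hk⟩ := h
  subst hk
  rw [Int.mul_ediv_cancel_left _ (by norm_num)]
  have hk0 : k ≠ 0 := by rintro rfl; simp at ht
  simp [Int.natAbs_mul]
  omega

theorem nu_pos (t : Int) (ht : t ≠ 0) (hd : (18:Int) ∣ t) : nu t = nu (t / 18) + 1 := by
  rw [nu]; simp [ht, hd]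

theorem nu_zero (t : Int) (hd : ¬ (18:Int) ∣ t) : nu t = 0 := by
  rw [nu]; simp [hd]

theorem natAbs_div18_lt (t : Int) (ht : t ≠ 0) (hd : (18:Int) ∣ t) :
    (t / 18).natAbs < t.natAbs := by
  obtain ⟨k, rfl⟩ := hd
  rw [Int.mul_ediv_cancel_left _ (by norm_num)]
  have hk0 : k ≠ 0 := by rintro rfl; simp at ht
  simp [Int.natAbs_mul]
  omega

theorem div18_ne_zero (t : Int) (ht : t ≠ 0) (hd : (18:Int) ∣ t) : t / 18 ≠ 0 := by
  obtain ⟨k, rfl⟩ := hd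
  rw [Int.mul_ediv_cancel_left _ (by norm_num)]
  rintro rfl; simp at ht

-- the repunit 1 + 18 + … + 18^(v-1), the value A's n accumulates
def rep : Nat → Int
  | 0 => 0
  | v+1 => 18 * rep v + 1

theorem rep_formula (v : Nat) : 17 * rep v + 1 = 18 ^ v := by
  induction v with
  | zero => simp [rep]
  | succ v ih => rw [rep, pow_succ]; linarith

-- the last nonzero base-18 digit (floor semantics for negatives)
def dgt (y : Int) : Int := PySem.Int.mod (y / 18 ^ nu y) 18

theorem dgt_step (y : Int) (hy : y ≠ 0) (hd : (18:Int) ∣ y) : dgt y = dgt (y / 18) := by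
  unfold dgt
  rw [nu_pos y hy hd, pow_succ, mul_comm, ← Int.ediv_ediv_of_nonneg (by norm_num : (0:Int) ≤ 18)]

theorem addLoopA_spec : ∀ (f : Nat) (x2 s n : Int), 0 < s → s ∣ x2 → x2 ≠ 0 →
    (x2 / s).natAbs ≤ f → 17 * n + 1 = s →
    (addLoopA f x2 n s).2 = s * 18 ^ (nu (x2 / s)) ∧
      17 * (addLoopA f x2 n s).1 + 1 = (addLoopA f x2 n s).2 := by
  intro f
  induction f with
  | zero =>
    intro x2 s n hs hd hx hf hn
    exfalso
    obtain ⟨k, rfl⟩ := hd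
    rw [Int.mul_ediv_cancel_left _ (by omega)] at hf
    have hk0 : k ≠ 0 := by rintro rfl; simp at hx
    omega
  | succ f ih =>
    intro x2 s n hs hd hx hf hn
    have hq : x2 / s * s = x2 := Int.ediv_mul_cancel hd
    by_cases hc : (s * 18) ∣ x2
    · have hm : PySem.Int.mod x2 (s * 18) = 0 :=
        (PySem.Int.mod_eq_zero_iff_dvd x2 (s * 18)).mpr hc
      have hd18 : (18:Int) ∣ x2 / s := by
        obtain ⟨m, hm2⟩ := hc
        refine ⟨m, ?_⟩
        have : x2 = s * (18 * m) := by linarith [hm2]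
        rw [this, Int.mul_ediv_cancel_left _ (by omega)]
      have hts : x2 / (s * 18) = (x2 / s) / 18 := by
        rw [Int.ediv_ediv_of_nonneg (by omega)]
      have ht0 : x2 / s ≠ 0 := by
        intro h; rw [h] at hq; simp at hq; exact hx hq.symm
      have hlt := natAbs_div18_lt (x2 / s) ht0 hd18
      rw [addLoopA]
      simp only [hm, if_pos]
      have h1 := ih x2 (s * 18) (n + s) (by positivity) hc hx
        (by rw [hts]; omega) (by linarith)
      rw [nu_pos (x2 / s) ht0 hd18]
      constructor
      · rw [h1.1, hts]; ring
      · exact h1.2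
    · have hm : PySem.Int.mod x2 (s * 18) ≠ 0 := by
        intro h; exact hc ((PySem.Int.mod_eq_zero_iff_dvd x2 (s * 18)).mp h)
      rw [addLoopA]
      simp only [if_neg hm]
      have hnu : nu (x2 / s) = 0 := by
        apply nu_zero
        intro ⟨m, hm2⟩
        exact hc ⟨m, by rw [← hq, hm2]; ring⟩
      simp [hnu, hn]

theorem addAltB_spec : ∀ (f : Nat) (y : Int), y ≠ 0 → y.natAbs ≤ f →
    addAltB f (y - 1) = y + rep (nu y) * dgt y ∧
      PySem.Int.mod (addAltB f (y - 1)) 18 = dgt y := by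
  intro f
  induction f with
  | zero => intro y hy hf; omega
  | succ f ih =>
    intro y hy hf
    have hy1 : y - 1 + 1 = y := by ring
    by_cases hd : (18:Int) ∣ y
    · have hm : PySem.Int.mod y 18 = 0 := (PySem.Int.mod_eq_zero_iff_dvd y 18).mpr hd
      have hfd : PySem.Int.floordiv y 18 = y / 18 :=
        PySem.Int.floordiv_eq_ediv_of_pos (by norm_num)
      have hy' : y / 18 ≠ 0 := div18_ne_zero y hy hd
      have hlt := natAbs_div18_lt y hy hd
      have hIH := ih (y / 18) hy' (by omega)
      have hh : addAltB (f+1) (y - 1) =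
          18 * addAltB f (y / 18 - 1) + PySem.Int.mod (addAltB f (y / 18 - 1)) 18 := by
        rw [addAltB]
        simp only [hy1, hm, hfd, ne_eq, not_true_eq_false, if_false]
      have hdg := dgt_step y hy hd
      have hval : addAltB (f+1) (y - 1) = y + rep (nu y) * dgt y := by
        rw [hh, hIH.2, hIH.1, nu_pos y hy hd, rep, hdg]
        have h18 : 18 * (y / 18) = y := Int.mul_ediv_cancel' hd
        ring_nf
        linarith [h18]
      refine ⟨hval, ?_⟩
      -- result = 18*(…) + dgt y with 0 ≤ dgt y < 18
      have hd0 : 0 ≤ dgt y := PySem.Int.mod_nonneg _ (by norm_num)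
      have hd18 : dgt y < 18 := PySem.Int.mod_lt _ (by norm_num)
      have hform : addAltB (f+1) (y - 1) =
          18 * (y / 18 + rep (nu (y / 18)) * dgt y) + dgt y := by
        rw [hval, nu_pos y hy hd, rep, hdg]
        have h18 : 18 * (y / 18) = y := Int.mul_ediv_cancel' hd
        ring_nf
        linarith [h18]
      rw [hform, PySem.Int.mod_eq_emod_of_pos (by norm_num)]
      omega
    · have hm : PySem.Int.mod y 18 ≠ 0 := by
        intro h; exact hd ((PySem.Int.mod_eq_zero_iff_dvd y 18).mp h)
      have hnu : nu y = 0 := nu_zero y hd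
      have hb : addAltB (f+1) (y - 1) = y := by
        rw [addAltB]; simp only [hy1]; rw [if_pos hm]
      refine ⟨by rw [hb, hnu]; simp [rep], ?_⟩
      rw [hb]
      unfold dgt
      rw [hnu]
      norm_num

theorem add_spec : Claim_equal_add := by
  intro x _ hpre
  unfold Spec_add add add_alt
  simp only []
  set y := x + 1 with hy
  have hy0 : y ≠ 0 := by unfold Pre_add at hpre; omega
  have hx1 : x = y - 1 := by omega
  by_cases hd : (18:Int) ∣ y
  · have hm : PySem.Int.mod y 18 = 0 := (PySem.Int.mod_eq_zero_iff_dvd y 18).mpr hd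
    rw [if_neg (not_not_intro hm)]
    have hB := addAltB_spec (y.natAbs + 1) y hy0 (by omega)
    have hA := addLoopA_spec (y.natAbs + 1) y 18 1 (by norm_num) hd hy0
      (by have := natAbs_div18_lt y hy0 hd; omega) (by norm_num)
    set ns := addLoopA (y.natAbs + 1) y 1 18 with hns
    have hnu : nu y = nu (y / 18) + 1 := nu_pos y hy0 hd
    have hs2 : ns.2 = 18 ^ (nu y) := by rw [hA.1, hnu, pow_succ]; ring
    have hn1 : ns.1 = rep (nu y) := by
      have := rep_formula (nu y)
      have := hA.2
      omega
    have hfd : PySem.Int.floordiv y ns.2 = y / 18 ^ (nu y) := by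
      rw [hs2, PySem.Int.floordiv_eq_ediv_of_pos (by positivity)]
    rw [hx1, hB.1, hfd, hn1]
    rfl
  · have hm : PySem.Int.mod y 18 ≠ 0 := by
      intro h; exact hd ((PySem.Int.mod_eq_zero_iff_dvd y 18).mp h)
    rw [if_pos hm, hx1]
    have hnu : nu y = 0 := nu_zero y hd
    have := addAltB_spec (y.natAbs + 1) y hy0 (by omega)
    rw [this.1, hnu]
    simp [rep]
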